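-- pv_equiv track=rewrite | github.com/lewisir/Advent-of-Code-2023 | Day12/aoc_day12.py | trim_dots
-- ===== SOURCE A (Python) =====
-- def trim_dots(spring_string):
--     """
--     Remove consecutice sequences of '.' from the string, reducing them to a single '.'
--     Also remove leading or trailing '.'
--     """
--     output_string = ''
--     found_dot = False
--     for char in spring_string:
--         if char != '.':
--             output_string += char
--             found_dot = False
--         elif char == '.' and not found_dot:
--             output_string += char
--             found_dot = True
--     output_string = remove_end_dots(output_string)
--     return output_string
--
-- def remove_end_dots(spring_string):
--     """Remove any leading or trailing dots"""
--     if spring_string[0] == '.':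
--         start = 1
--     else:
--         start = 0
--     if spring_string[-1] == '.':
--         end = -1
--     else:
--         end = None
--     return spring_string[start:end]
-- ===== SOURCE B (Python) =====
-- def trim_dots(spring_string):
--     """
--     Collapse runs of '.' to a single '.' and drop leading/trailing dots,
--     by splitting on the dot separator and joining the nonempty pieces.
--     """
--     parts = [p for p in spring_string.split('.') if p]
--     return '.'.join(parts)
-- ===== Notes on version B (the rewrite author's own statement) =====
-- stated objective: simpler
-- what changed: Replaces the char-by-char found_dot state-machine loop plus the indexing-based remove_end_dots helper with a single split-on-dot / drop-empty-pieces / join tokenization.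
-- outside the precondition, e.g. on trim_dots(''): A raises IndexError, B returns ''
import Mathlib
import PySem

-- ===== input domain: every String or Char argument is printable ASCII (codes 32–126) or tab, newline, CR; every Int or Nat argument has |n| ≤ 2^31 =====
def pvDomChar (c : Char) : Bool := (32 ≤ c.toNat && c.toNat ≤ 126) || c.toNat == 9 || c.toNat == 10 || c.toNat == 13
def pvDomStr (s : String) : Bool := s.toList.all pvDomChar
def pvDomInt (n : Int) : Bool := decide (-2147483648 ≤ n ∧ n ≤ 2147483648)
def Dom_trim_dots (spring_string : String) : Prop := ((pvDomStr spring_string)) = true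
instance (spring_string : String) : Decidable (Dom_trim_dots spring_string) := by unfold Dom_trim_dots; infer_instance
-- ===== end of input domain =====

-- B collapses dot runs and trims end dots by splitting on the dot separator, dropping empty
-- pieces and joining, instead of A's char-by-char state-machine loop plus its end-trimming helper.

-- ===== PORT A =====
-- the loop body of A: append non-dots, append the first dot of a run, set/reset found_dot
def pvStepA (st : List Char × Bool) (c : Char) : List Char × Bool :=
  if c ≠ '.' then (st.1 ++ [c], false)
  else if c = '.' ∧ st.2 = false then (st.1 ++ [c], true)
  else st

-- helper remove_end_dots: spring_string[0], spring_string[-1], spring_string[start:end]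
def pvRemoveEndDots (s : List Char) : List Char :=
  let start : Int := if PySem.List.pyGet? s 0 = some '.' then 1 else 0
  let stop : Option Int := if PySem.List.pyGet? s (-1) = some '.' then some (-1) else none
  PySem.List.slice s (some start) stop

def trim_dots (spring_string : String) : String :=
  let out := spring_string.toList.foldl pvStepA ([], false)
  String.ofList (pvRemoveEndDots out.1)

-- ===== PORT B =====
def trim_dots_alt (spring_string : String) : String :=
  String.ofList (PySem.Chars.join ['.']
    ((PySem.Chars.splitOn spring_string.toList ['.']).filter (fun p => p ≠ [])))

-- ===== PRECONDITION & SPEC =====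
-- Pre_ excludes only the empty string, on which A's remove_end_dots raises IndexError; B returns '' there.
def Pre_trim_dots (spring_string : String) : Prop := spring_string ≠ ""
instance (spring_string : String) : Decidable (Pre_trim_dots spring_string) := by
  unfold Pre_trim_dots; infer_instance
def pvWitness_trim_dots : String := ".a..b."

def Spec_trim_dots (spring_string : String) (out : String) : Prop := out = trim_dots_alt spring_string
instance (spring_string : String) (out : String) : Decidable (Spec_trim_dots spring_string out) := by
  unfold Spec_trim_dots; infer_instance

-- ===== CLAIM (what is proved, stated in full; the proofs are below) =====
def Claim_equal_trim_dots : Prop := ∀ (spring_string : String), Dom_trim_dots spring_string → Pre_trim_dots spring_string → Spec_trim_dots spring_string (trim_dots spring_string)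

-- ===== LEMMAS AND PROOFS =====

-- A's loop as structural recursion (b = found_dot)
def pvCol : Bool → List Char → List Char
  | _, [] => []
  | b, c :: t =>
    if c ≠ '.' then c :: pvCol false t
    else if b = false then '.' :: pvCol true t
    else pvCol true t

-- split on '.' (single-char separator), cons-structured
def pvSplit : List Char → List (List Char)
  | [] => [[]]
  | c :: t =>
    if c = '.' then [] :: pvSplit t
    else match pvSplit t with
      | [] => [[c]]
      | p :: ps => (c :: p) :: ps

-- the tail of A's collapsed output, per remaining part list
def pvT : List (List Char) → List Char
  | [] => []
  | p :: rest =>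
    if p = [] then (if rest = [] then ['.'] else pvT rest)
    else '.' :: (p ++ pvT rest)

def pvU : List (List Char) → List Char
  | [] => []
  | p :: rest =>
    match rest with
    | [] => p
    | _ :: _ => if p = [] then pvU rest else p ++ pvT rest

def pvW (rest : List (List Char)) : List Char :=
  (rest.filter (fun p => p ≠ [])).flatMap (fun w => '.' :: w)

def pvTrimFn (o : List Char) : List Char :=
  if o.getLast? = some '.' then (if o.head? = some '.' then o.tail else o).dropLast
  else (if o.head? = some '.' then o.tail else o)

theorem pvSplit_ne_nil (l : List Char) : pvSplit l ≠ [] := by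
  cases l with
  | nil => simp [pvSplit]
  | cons c t =>
    simp only [pvSplit]
    split
    · simp
    · cases h : pvSplit t <;> simp

theorem pvFoldl_stepA (l : List Char) (acc : List Char) (b : Bool) :
    (List.foldl pvStepA (acc, b) l).1 = acc ++ pvCol b l := by
  induction l generalizing acc b with
  | nil => simp [pvCol]
  | cons c t ih =>
    by_cases hc : c = '.'
    · cases b with
      | false => simp [pvStepA, pvCol, hc, ih]
      | true => simp [pvStepA, pvCol, hc, ih]
    · simp [pvStepA, pvCol, hc, ih]

theorem pvGo_eq (fuel : Nat) (l cur : List Char) (acc : List (List Char))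
    (h : l.length < fuel) :
    PySem.Chars.splitOn.go ['.'] fuel l cur acc =
      acc.reverse ++ (cur.reverse ++ (pvSplit l).headI) :: (pvSplit l).tail := by
  induction fuel generalizing l cur acc with
  | zero => omega
  | succ fuel ih =>
    cases l with
    | nil =>
      simp [PySem.Chars.splitOn.go, pvSplit]
    | cons c rest =>
      by_cases hc : c = '.'
      · rw [show PySem.Chars.splitOn.go ['.'] (fuel+1) (c :: rest) cur acc =
            PySem.Chars.splitOn.go ['.'] fuel rest [] (cur.reverse :: acc) by
          simp [PySem.Chars.splitOn.go, List.isPrefixOf, hc]]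
        rw [ih rest [] (cur.reverse :: acc) (by simpa using h)]
        obtain ⟨p, ps, hps⟩ := List.exists_cons_of_ne_nil (pvSplit_ne_nil rest)
        simp [pvSplit, hc, hps]
      · rw [show PySem.Chars.splitOn.go ['.'] (fuel+1) (c :: rest) cur acc =
            PySem.Chars.splitOn.go ['.'] fuel rest (c :: cur) acc by
          simp [PySem.Chars.splitOn.go, List.isPrefixOf, Ne.symm hc]]
        rw [ih rest (c :: cur) acc (by simpa using h)]
        obtain ⟨p, ps, hps⟩ := List.exists_cons_of_ne_nil (pvSplit_ne_nil rest)
        simp [pvSplit, hc, hps]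

theorem pvSplitOn_eq (l : List Char) : PySem.Chars.splitOn l ['.'] = pvSplit l := by
  unfold PySem.Chars.splitOn
  rw [pvGo_eq (l.length + 1) l [] [] (by omega)]
  obtain ⟨p, ps, hps⟩ := List.exists_cons_of_ne_nil (pvSplit_ne_nil l)
  simp [hps]

theorem pvDotfree (l : List Char) : ∀ p ∈ pvSplit l, '.' ∉ p := by
  induction l with
  | nil => simp [pvSplit]
  | cons c t ih =>
    by_cases hc : c = '.'
    · simp only [pvSplit, if_pos hc]
      intro p hp
      rcases List.mem_cons.mp hp with h | h
      · subst h; simp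
      · exact ih p h
    · obtain ⟨q, ps, hps⟩ := List.exists_cons_of_ne_nil (pvSplit_ne_nil t)
      simp only [pvSplit, if_neg hc, hps]
      intro p hp
      rcases List.mem_cons.mp hp with h | h
      · subst h
        intro hmem
        rcases List.mem_cons.mp hmem with h' | h'
        · exact hc h'.symm
        · exact ih q (hps ▸ List.mem_cons_self) h'
      · exact ih p (hps ▸ List.mem_cons_of_mem q h)

theorem pvTU (m : List (List Char)) (h : m ≠ []) : pvT m = '.' :: pvU m := by
  induction m with
  | nil => exact absurd rfl h
  | cons p rest ih =>
    cases rest with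
    | nil => by_cases hp : p = [] <;> simp [pvT, pvU, hp]
    | cons q rs =>
      by_cases hp : p = []
      · subst hp
        rw [show pvT ([] :: q :: rs) = pvT (q :: rs) from by simp [pvT],
          show pvU ([] :: q :: rs) = pvU (q :: rs) from by simp [pvU]]
        exact ih (by simp)
      · simp [pvT, pvU, hp]

theorem pvColT (t : List Char) :
    pvCol false t = (pvSplit t).headI ++ pvT (pvSplit t).tail ∧
      pvCol true t = pvU (pvSplit t) := by
  induction t with
  | nil => simp [pvCol, pvSplit, pvT, pvU]
  | cons c t ih =>
    by_cases hc : c = '.'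
    · subst hc
      obtain ⟨q, ps, hps⟩ := List.exists_cons_of_ne_nil (pvSplit_ne_nil t)
      constructor
      · rw [show pvSplit ('.' :: t) = [] :: pvSplit t from by simp [pvSplit]]
        simp only [List.headI, List.tail_cons, List.nil_append]
        rw [show pvCol false ('.' :: t) = '.' :: pvCol true t from by simp [pvCol],
          ih.2, pvTU _ (pvSplit_ne_nil t)]
      · rw [show pvCol true ('.' :: t) = pvCol true t from by simp [pvCol], ih.2,
          show pvSplit ('.' :: t) = [] :: pvSplit t from by simp [pvSplit], hps]
        simp [pvU]
    · obtain ⟨q, ps, hps⟩ := List.exists_cons_of_ne_nil (pvSplit_ne_nil t)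
      have h1 : pvCol false (c :: t) = c :: (q ++ pvT ps) := by
        simp only [pvCol, if_pos hc]
        rw [ih.1, hps]; simp
      have h2 : pvCol true (c :: t) = c :: (q ++ pvT ps) := by
        simp only [pvCol, if_pos hc]
        rw [ih.1, hps]; simp
      constructor
      · rw [h1]; simp [pvSplit, hc, hps]
      · rw [h2]
        simp only [pvSplit, if_neg hc, hps]
        cases ps with
        | nil => simp [pvU, pvT]
        | cons r rs => simp [pvU]

theorem pvT_eq_W (rest : List (List Char)) :
    pvT rest = pvW rest ++ (if rest.getLast? = some [] then ['.'] else []) := by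
  induction rest with
  | nil => simp [pvT, pvW]
  | cons p rest ih =>
    cases rest with
    | nil => by_cases hp : p = [] <;> simp [pvT, pvW, hp]
    | cons q rs =>
      by_cases hp : p = []
      · subst hp
        have h1 : pvW ([] :: q :: rs) = pvW (q :: rs) := by simp [pvW]
        rw [show pvT ([] :: q :: rs) = pvT (q :: rs) from by simp [pvT], ih, h1,
          List.getLast?_cons_cons]
      · have h1 : pvW (p :: q :: rs) = ('.' :: p) ++ pvW (q :: rs) := by
          simp [pvW, hp]
        rw [show pvT (p :: q :: rs) = '.' :: (p ++ pvT (q :: rs)) from by simp [pvT, hp],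
          ih, h1, List.getLast?_cons_cons]
        simp

theorem pvFlatMapDot (ws : List (List Char)) :
    ws.flatMap (fun w => '.' :: w) =
      if ws = [] then [] else '.' :: List.intercalate ['.'] ws := by
  induction ws with
  | nil => simp
  | cons w ws ih =>
    cases ws with
    | nil => simp [List.intercalate]
    | cons x xs =>
      rw [List.flatMap_cons, ih]
      simp only [if_neg (by simp : ¬(x :: xs = [])), if_neg (by simp : ¬(w :: x :: xs = []))]
      rw [show List.intercalate ['.'] (w :: x :: xs) =
          w ++ ['.'] ++ List.intercalate ['.'] (x :: xs) by simp [List.intercalate]]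
      simp

theorem pvIntercalate_cons (p : List Char) (F : List (List Char)) :
    List.intercalate ['.'] (p :: F) = p ++ F.flatMap (fun w => '.' :: w) := by
  have h := pvFlatMapDot (p :: F)
  rw [if_neg (by simp : ¬(p :: F = [])), List.flatMap_cons] at h
  simpa using h.symm

theorem pvLastNondot (F : List (List Char))
    (h : ∀ p ∈ F, p ≠ [] ∧ '.' ∉ p) (hF : F ≠ []) :
    ∃ c, c ≠ '.' ∧ (F.flatMap (fun w => '.' :: w)).getLast? = some c := by
  induction F with
  | nil => exact absurd rfl hF
  | cons w ws ih =>
    cases ws with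
    | nil =>
      obtain ⟨hw, hdot⟩ := h w List.mem_cons_self
      cases hlast : w.getLast? with
      | none => exact absurd (List.getLast?_eq_none_iff.mp hlast) hw
      | some c =>
        refine ⟨c, fun hcd => hdot (hcd ▸ List.mem_of_getLast? hlast), ?_⟩
        simp only [List.flatMap_cons, List.flatMap_nil, List.append_nil]
        rw [show ('.' :: w) = ['.'] ++ w by rfl, List.getLast?_append_of_ne_nil _ hw]
        exact hlast
    | cons x xs =>
      obtain ⟨c, hc, hl⟩ := ih (fun p hp => h p (List.mem_cons_of_mem w hp)) (by simp)
      refine ⟨c, hc, ?_⟩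
      rw [List.flatMap_cons, List.getLast?_append_of_ne_nil _ (by simp [List.flatMap_cons])]
      exact hl

theorem pvSliceOneNegOne (a : Char) (t : List Char) :
    PySem.List.slice (a :: t) (some 1) (some (-1)) = t.dropLast := by
  simp [PySem.List.slice, PySem.List.clampIdx, List.dropLast_eq_take]
  split <;> omega

theorem pvTrim_eq (o : List Char) : pvRemoveEndDots o = pvTrimFn o := by
  unfold pvRemoveEndDots pvTrimFn
  cases o with
  | nil => simp [PySem.List.pyGet?, PySem.List.slice_none_none]
  | cons a t =>
    rw [PySem.List.pyGet?_zero, PySem.List.pyGet?_neg_one]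
    by_cases ha : a = '.'
    · subst ha
      by_cases hl : (('.' : Char) :: t).getLast? = some '.' <;>
        simp [hl, pvSliceOneNegOne, PySem.List.slice_from_one]
    · by_cases hl : (a :: t).getLast? = some '.' <;>
        simp [ha, hl, PySem.List.slice_to_neg_one, PySem.List.slice_none_none]

theorem pvCore (p W D : List Char) (hp : '.' ∉ p)
    (hW : W = [] ∨ (W.head? = some '.' ∧ ∃ c, c ≠ '.' ∧ W.getLast? = some c))
    (hD : D = [] ∨ D = ['.']) :
    pvTrimFn (p ++ W ++ D) = if p = [] then W.tail else p ++ W := by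
  unfold pvTrimFn
  by_cases hp0 : p = []
  · subst hp0
    rw [if_pos rfl]
    simp only [List.nil_append]
    rcases hW with hW | ⟨hWh, c, hc, hWl⟩
    · subst hW; rcases hD with hD | hD <;> subst hD <;> simp
    · have hWne : W ≠ [] := by intro h; rw [h] at hWh; simp at hWh
      obtain ⟨w, ws, rfl⟩ := List.exists_cons_of_ne_nil hWne
      have hw : w = '.' := by simpa using hWh
      subst hw
      rcases hD with hD | hD <;> subst hD
      · have h3 : ¬((('.' : Char) :: ws).getLast? = some '.') := by
          rw [hWl]; simpa using hc
        rw [List.append_nil, if_neg h3, if_pos (show (('.' : Char) :: ws).head? = some '.' from rfl)]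
      · have h3 : ((('.' : Char) :: ws) ++ ['.']).getLast? = some '.' := by
          rw [List.getLast?_append_of_ne_nil _ (by simp)]; rfl
        rw [if_pos h3, if_pos (show ((('.' : Char) :: ws) ++ ['.']).head? = some '.' from rfl)]
        rw [show ((('.' : Char) :: ws) ++ ['.']).tail = ws ++ ['.'] from rfl,
          List.dropLast_concat, List.tail_cons]
  · obtain ⟨x, xs, rfl⟩ := List.exists_cons_of_ne_nil hp0
    have hx : x ≠ '.' := fun h => hp (h ▸ List.mem_cons_self)
    rw [if_neg hp0]
    have hlast : ∃ c, c ≠ '.' ∧ ((x :: xs) ++ W).getLast? = some c := by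
      by_cases hWne : W = []
      · subst hWne
        cases hlast : (x :: xs).getLast? with
        | none => simp at hlast
        | some c =>
          exact ⟨c, fun hcd => hp (hcd ▸ List.mem_of_getLast? hlast), by simpa using hlast⟩
      · rcases hW with hW | ⟨_, c, hc, hWl⟩
        · exact absurd hW hWne
        · exact ⟨c, hc, by rw [List.getLast?_append_of_ne_nil _ hWne]; exact hWl⟩
    obtain ⟨c, hc, hcl⟩ := hlast
    rcases hD with hD | hD <;> subst hD
    · have h3 : ¬(((x :: xs) ++ W).getLast? = some '.') := by
        rw [hcl]; simpa using fun h => hc h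
      have h2 : ¬(((x :: xs) ++ W).head? = some '.') := by
        rw [show ((x :: xs) ++ W).head? = some x from rfl]; simpa using hx
      rw [List.append_nil, if_neg h3, if_neg h2]
    · have h3 : (((x :: xs) ++ W) ++ ['.']).getLast? = some '.' := by
        rw [List.getLast?_append_of_ne_nil _ (by simp)]; rfl
      have h2 : ¬((((x :: xs) ++ W) ++ ['.']).head? = some '.') := by
        rw [show (((x :: xs) ++ W) ++ ['.']).head? = some x from rfl]; simpa using hx
      rw [if_pos h3, if_neg h2, List.dropLast_concat]

theorem pvMain (l : List Char) :
    pvTrimFn (pvCol false l) =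
      List.intercalate ['.'] ((pvSplit l).filter (fun p => p ≠ [])) := by
  obtain ⟨p, rest, hps⟩ := List.exists_cons_of_ne_nil (pvSplit_ne_nil l)
  have hcol : pvCol false l = p ++ pvT rest := by
    rw [(pvColT l).1, hps]; rfl
  have hdf : ∀ q ∈ p :: rest, '.' ∉ q := by rw [← hps]; exact pvDotfree l
  have hdfF : ∀ q ∈ rest.filter (fun p => p ≠ []), q ≠ [] ∧ '.' ∉ q := by
    intro q hq
    have := List.mem_filter.mp hq
    exact ⟨by simpa using this.2, hdf q (List.mem_cons_of_mem p this.1)⟩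
  have hWshape : pvW rest = [] ∨
      ((pvW rest).head? = some '.' ∧ ∃ c, c ≠ '.' ∧ (pvW rest).getLast? = some c) := by
    by_cases hF : rest.filter (fun p => p ≠ []) = []
    · left; unfold pvW; rw [hF]; rfl
    · right
      constructor
      · unfold pvW; rw [pvFlatMapDot, if_neg hF]; rfl
      · exact pvLastNondot _ hdfF hF
  rw [hcol, pvT_eq_W rest, ← List.append_assoc,
    pvCore p (pvW rest) _ (hdf p List.mem_cons_self) hWshape (by split <;> simp)]
  rw [hps]
  by_cases hp : p = []
  · subst hp
    rw [if_pos rfl]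
    simp only [List.filter_cons, decide_eq_true_eq]
    rw [if_neg (by simp)]
    by_cases hF : rest.filter (fun p => p ≠ []) = []
    · unfold pvW; rw [hF]; simp [List.intercalate]
    · unfold pvW; rw [pvFlatMapDot, if_neg hF]; rfl
  · rw [if_neg hp]
    simp only [List.filter_cons, decide_eq_true_eq]
    rw [if_pos (by simpa using hp), pvIntercalate_cons]
    rfl

-- ===== VERDICT (by name: the statement is the Claim_ definition above) =====
theorem trim_dots_spec : Claim_equal_trim_dots := by
  intro s _ _
  show trim_dots s = trim_dots_alt s
  unfold trim_dots trim_dots_alt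
  simp only [PySem.Chars.join, pvSplitOn_eq, pvFoldl_stepA s.toList [] false,
    List.nil_append, pvTrim_eq, pvMain]
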